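-- pv_equiv track=rewrite | github.com/guzhuoqi/reclaim | mitmproxy2swagger/feature-library/learning_engine/api_attribute_extractor.py | _identify_compliance_indicators
-- ===== SOURCE A (Python) =====
-- from typing import Dict, List, Any, Optional, Tuple, Set
--
-- def _identify_compliance_indicators(sensitive_fields: List[str]) -> List[str]:
--     """识别合规指标"""
--     indicators = []
--
--     compliance_patterns = {
--         'PCI_DSS': ['card.*number', 'cvv', 'security.*code'],
--         'GDPR': ['personal.*data', 'email', 'phone', 'address'],
--         'SOX': ['financial.*statement', 'audit', 'internal.*control'],
--         'KYC': ['customer.*id', 'identity', 'verification']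
--     }
--
--     for compliance, patterns in compliance_patterns.items():
--         for pattern in patterns:
--             if any(pattern in field for field in sensitive_fields):
--                 indicators.append(compliance)
--                 break
--
--     return indicators
-- ===== SOURCE B (Python) =====
-- def _identify_compliance_indicators(sensitive_fields):
--     """识别合规指标"""
--     compliance_patterns = {
--         'PCI_DSS': ['card.*number', 'cvv', 'security.*code'],
--         'GDPR': ['personal.*data', 'email', 'phone', 'address'],
--         'SOX': ['financial.*statement', 'audit', 'internal.*control'],
--         'KYC': ['customer.*id', 'identity', 'verification']
--     }
--     # No pattern contains '\n', so a pattern occurs in some field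
--     # iff it occurs in the newline-joined corpus of all fields.
--     blob = "\n".join(sensitive_fields)
--     return [c for c, patterns in compliance_patterns.items()
--             if any(p in blob for p in patterns)]
-- ===== Notes on version B (the rewrite author's own statement) =====
-- stated objective: faster
-- what changed: B joins all fields into one newline-separated corpus string and performs a single substring test per pattern against that corpus (correct because no pattern contains a newline), replacing A's per-pattern Python-level scan over every field.
import Mathlib
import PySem

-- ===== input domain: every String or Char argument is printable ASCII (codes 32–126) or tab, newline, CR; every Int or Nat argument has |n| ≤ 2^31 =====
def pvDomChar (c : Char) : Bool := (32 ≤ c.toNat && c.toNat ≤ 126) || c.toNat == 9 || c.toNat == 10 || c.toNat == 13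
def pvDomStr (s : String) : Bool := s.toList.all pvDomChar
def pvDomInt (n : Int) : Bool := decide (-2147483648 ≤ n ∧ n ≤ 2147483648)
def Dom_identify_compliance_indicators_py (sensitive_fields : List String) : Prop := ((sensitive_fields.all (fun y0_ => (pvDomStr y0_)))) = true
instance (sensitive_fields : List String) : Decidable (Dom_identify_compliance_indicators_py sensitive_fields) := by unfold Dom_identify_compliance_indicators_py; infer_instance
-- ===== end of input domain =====

-- B builds one newline-joined corpus of all fields and tests each pattern once against it
-- (no pattern contains a newline), instead of A's per-pattern scan over every field; alternative decomposition.


-- the literal compliance_patterns dict (insertion order), shared data constant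
def pvCompliancePatterns : List (String × List String) :=
  [("PCI_DSS", ["card.*number", "cvv", "security.*code"]),
   ("GDPR", ["personal.*data", "email", "phone", "address"]),
   ("SOX", ["financial.*statement", "audit", "internal.*control"]),
   ("KYC", ["customer.*id", "identity", "verification"])]

-- ===== PORT A =====
-- A's inner 'for pattern in patterns: if any(pattern in field for field in sensitive_fields): …; break'
def pvAGroupHits (sensitive_fields : List String) : List String → Bool
  | [] => false
  | p :: rest =>
      if sensitive_fields.any (fun field => PySem.Str.isIn p field) then true
      else pvAGroupHits sensitive_fields rest

def identify_compliance_indicators_py (sensitive_fields : List String) : List String :=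
  pvCompliancePatterns.foldl
    (fun indicators cp => if pvAGroupHits sensitive_fields cp.2 then indicators ++ [cp.1] else indicators)
    []

-- ===== PORT B =====
-- B: blob = "\n".join(sensitive_fields); [c for c, ps in patterns.items() if any(p in blob for p in ps)]
def identify_compliance_indicators_py_alt (sensitive_fields : List String) : List String :=
  let blob := PySem.Str.join "\n" sensitive_fields
  (pvCompliancePatterns.filter
      (fun cp => cp.2.any (fun p => PySem.Str.isIn p blob))).map Prod.fst

-- ===== PRECONDITION & SPEC =====
def Spec_identify_compliance_indicators_py (sensitive_fields : List String) (out : List String) : Prop := out = identify_compliance_indicators_py_alt sensitive_fields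
instance (sensitive_fields : List String) (out : List String) : Decidable (Spec_identify_compliance_indicators_py sensitive_fields out) := by unfold Spec_identify_compliance_indicators_py; infer_instance

-- ===== CLAIM =====
def Claim_equal_identify_compliance_indicators_py : Prop := ∀ (sensitive_fields : List String), Dom_identify_compliance_indicators_py sensitive_fields → Spec_identify_compliance_indicators_py sensitive_fields (identify_compliance_indicators_py sensitive_fields)

-- ===== LEMMAS AND PROOFS =====

theorem pvAGroupHits_iff (fs : List String) (ps : List String) :
    pvAGroupHits fs ps = true ↔ ∃ p ∈ ps, ∃ f ∈ fs, PySem.Str.isIn p f = true := by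
  induction ps with
  | nil => simp [pvAGroupHits]
  | cons p rest ih =>
      simp only [pvAGroupHits]
      by_cases h : fs.any (fun field => PySem.Str.isIn p field) = true
      · rw [if_pos h]
        obtain ⟨f, hf, hin⟩ := List.any_eq_true.mp h
        exact iff_of_true rfl ⟨p, List.mem_cons_self, f, hf, hin⟩
      · rw [if_neg h, ih]
        have hno : ∀ f ∈ fs, ¬ PySem.Str.isIn p f = true := by
          intro f hf hc; exact h (List.any_eq_true.mpr ⟨f, hf, hc⟩)
        constructor
        · rintro ⟨q, hq, hw⟩; exact ⟨q, List.mem_cons_of_mem _ hq, hw⟩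
        · rintro ⟨q, hq, f, hf, hw⟩
          rcases List.mem_cons.mp hq with rfl | hq'
          · exact absurd hw (hno f hf)
          · exact ⟨q, hq', f, hf, hw⟩

-- an occurrence of a sep-free nonempty word in l₁ ++ sep :: l₂ lies wholly in l₁ or in l₂
theorem infix_append_sep {sub l₁ l₂ : List Char} {sep : Char}
    (hsep : sep ∉ sub) :
    sub <:+: l₁ ++ sep :: l₂ ↔ sub <:+: l₁ ∨ sub <:+: l₂ := by
  constructor
  · rintro ⟨a, b, h⟩
    by_cases h1 : a.length + sub.length ≤ l₁.length
    · left
      have ht := congrArg (List.take (a.length + sub.length)) h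
      rw [List.take_append_of_le_length h1] at ht
      have h3 : a ++ sub = l₁.take (a.length + sub.length) := by
        rw [← ht, show a ++ sub ++ b = (a ++ sub) ++ b from by simp,
          List.take_left' (by simp)]
      exact ⟨a, l₁.drop (a.length + sub.length), by
        rw [show a ++ sub ++ l₁.drop (a.length + sub.length)
              = (a ++ sub) ++ l₁.drop (a.length + sub.length) from by simp,
          h3, List.take_append_drop]⟩
    · by_cases h2 : l₁.length + 1 ≤ a.length
      · right
        have hd := congrArg (List.drop (l₁.length + 1)) h
        rw [show a ++ sub ++ b = a ++ (sub ++ b) from by simp,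
          List.drop_append_of_le_length h2,
          show l₁ ++ sep :: l₂ = (l₁ ++ [sep]) ++ l₂ from by simp,
          List.drop_left' (by simp)] at hd
        exact ⟨a.drop (l₁.length + 1), b, by
          rw [show a.drop (l₁.length + 1) ++ sub ++ b
                = a.drop (l₁.length + 1) ++ (sub ++ b) from by simp, hd]⟩
      · exfalso
        have ha : a.length ≤ l₁.length := by omega
        have hlt : l₁.length < a.length + sub.length := by omega
        have heq : (a ++ (sub ++ b))[l₁.length]? = (l₁ ++ sep :: l₂)[l₁.length]? := by
          rw [show a ++ sub ++ b = a ++ (sub ++ b) from by simp] at h; rw [h]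
        have hr : (l₁ ++ sep :: l₂)[l₁.length]? = some sep := by
          rw [List.getElem?_append_right (le_refl _)]; simp
        have hl : (a ++ (sub ++ b))[l₁.length]? = sub[l₁.length - a.length]? := by
          rw [List.getElem?_append_right ha, List.getElem?_append_left (by omega)]
        exact hsep (List.mem_of_getElem? (hl.symm.trans (heq.trans hr)))
  · rintro (⟨a, b, h⟩ | ⟨a, b, h⟩)
    · exact ⟨a, b ++ sep :: l₂, by rw [← h]; simp⟩
    · exact ⟨l₁ ++ sep :: a, b, by rw [← h]; simp⟩

theorem infix_join {sub : List Char} {sep : Char}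
    (hne : sub ≠ []) (hsep : sep ∉ sub) :
    ∀ (parts : List (List Char)),
      sub <:+: PySem.Chars.join [sep] parts ↔ ∃ l ∈ parts, sub <:+: l
  | [] => by
      simp only [PySem.Chars.join, List.intercalate, List.intersperse, List.flatten_nil]
      constructor
      · intro h; exact absurd (List.eq_nil_of_infix_nil h) hne
      · rintro ⟨l, hl, _⟩; simp at hl
  | [x] => by simp [PySem.Chars.join, List.intercalate]
  | x :: y :: rest => by
      have ih := infix_join hne hsep (y :: rest)
      have hcc : PySem.Chars.join [sep] (x :: y :: rest)
          = x ++ sep :: PySem.Chars.join [sep] (y :: rest) := by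
        simp [PySem.Chars.join, List.intercalate, List.intersperse]
      rw [hcc, infix_append_sep hsep, ih]
      constructor
      · rintro (h | ⟨l, hl, h⟩)
        · exact ⟨x, List.mem_cons_self, h⟩
        · exact ⟨l, List.mem_cons_of_mem _ hl, h⟩
      · rintro ⟨l, hl, h⟩
        rcases List.mem_cons.mp hl with rfl | hl'
        · exact Or.inl h
        · exact Or.inr ⟨l, hl', h⟩

-- pattern-in-joined-corpus equals pattern-in-some-field, for newline-free nonempty patterns
theorem isIn_join_eq_any (p : String) (fs : List String)
    (hne : p.toList ≠ []) (hsep : '\n' ∉ p.toList) :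
    PySem.Str.isIn p (PySem.Str.join "\n" fs) = fs.any (fun f => PySem.Str.isIn p f) := by
  rw [Bool.eq_iff_iff, PySem.Str.isIn_iff_infix, List.any_eq_true]
  have hj : (PySem.Str.join "\n" fs).toList = PySem.Chars.join ['\n'] (fs.map String.toList) := by
    simp [PySem.Str.toList_join]
  rw [hj, infix_join hne hsep]
  constructor
  · rintro ⟨l, hl, h⟩
    obtain ⟨f, hf, rfl⟩ := List.mem_map.mp hl
    exact ⟨f, hf, (PySem.Str.isIn_iff_infix p f).mpr h⟩
  · rintro ⟨f, hf, h⟩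
    exact ⟨f.toList, List.mem_map.mpr ⟨f, hf, rfl⟩, (PySem.Str.isIn_iff_infix p f).mp h⟩

-- per pattern group: B's single corpus test equals A's group scan
theorem group_eq (fs : List String) (ps : List String)
    (hok : ∀ p ∈ ps, p.toList ≠ [] ∧ '\n' ∉ p.toList) :
    ps.any (fun p => PySem.Str.isIn p (PySem.Str.join "\n" fs)) = pvAGroupHits fs ps := by
  rw [Bool.eq_iff_iff, List.any_eq_true, pvAGroupHits_iff]
  constructor
  · rintro ⟨p, hp, h⟩
    obtain ⟨hne, hsep⟩ := hok p hp
    rw [isIn_join_eq_any p fs hne hsep, List.any_eq_true] at h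
    obtain ⟨f, hf, h⟩ := h
    exact ⟨p, hp, f, hf, h⟩
  · rintro ⟨p, hp, f, hf, h⟩
    obtain ⟨hne, hsep⟩ := hok p hp
    exact ⟨p, hp, by
      rw [isIn_join_eq_any p fs hne hsep, List.any_eq_true]; exact ⟨f, hf, h⟩⟩

-- ===== VERDICT =====
theorem identify_compliance_indicators_py_spec : Claim_equal_identify_compliance_indicators_py := by
  intro fs _
  unfold Spec_identify_compliance_indicators_py identify_compliance_indicators_py identify_compliance_indicators_py_alt
  have g1 := group_eq fs ["card.*number", "cvv", "security.*code"] (by decide)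
  have g2 := group_eq fs ["personal.*data", "email", "phone", "address"] (by decide)
  have g3 := group_eq fs ["financial.*statement", "audit", "internal.*control"] (by decide)
  have g4 := group_eq fs ["customer.*id", "identity", "verification"] (by decide)
  simp only [pvCompliancePatterns, List.foldl_cons, List.foldl_nil,
    List.filter_cons, List.filter_nil, g1, g2, g3, g4]
  by_cases b1 : pvAGroupHits fs ["card.*number", "cvv", "security.*code"] = true <;>
    by_cases b2 : pvAGroupHits fs ["personal.*data", "email", "phone", "address"] = true <;>
      by_cases b3 : pvAGroupHits fs ["financial.*statement", "audit", "internal.*control"] = true <;>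
        by_cases b4 : pvAGroupHits fs ["customer.*id", "identity", "verification"] = true <;>
          simp [b1, b2, b3, b4]
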